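-- pv_equiv track=rewrite | github.com/queelius/computational-explorations | src/verifiable_attacks.py | find_A087280
-- ===== SOURCE A (Python) =====
-- from typing import List, Tuple, Dict, Optional, Set
--
-- def compute_n_plus_tau(N: int) -> List[int]:
--     """
--     Compute n + τ(n) for n = 1, ..., N using a sieve for τ.
--     Returns list where result[i] = (i+1) + τ(i+1) for i = 0,...,N-1.
--     """
--     # Sieve for divisor count
--     tau = [0] * (N + 1)
--     for d in range(1, N + 1):
--         for multiple in range(d, N + 1, d):
--             tau[multiple] += 1
--
--     return [n + tau[n] for n in range(1, N + 1)]
--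
-- def find_A087280(N: int) -> List[int]:
--     """
--     OEIS A087280: values of n where max_{m<n}(m + τ(m)) ≤ n + 2.
--
--     This is Erdős Problem #647.
--     Known solutions: 5, 8, 10, 12, 24.
--     £25 prize for finding n > 24.
--     """
--     npt = compute_n_plus_tau(N)
--     # npt[i] = (i+1) + τ(i+1), so npt[m-1] = m + τ(m)
--
--     solutions = []
--     running_max = 0
--
--     for n in range(1, N + 1):
--         # running_max = max_{m < n}(m + τ(m))
--         if n > 1:
--             # Update running max with m = n-1
--             running_max = max(running_max, npt[n - 2])
--
--         if running_max <= n + 2: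
--             solutions.append(n)
--
--     return solutions
-- ===== SOURCE B (Python) =====
-- from typing import List
--
--
-- def find_A087280(N: int) -> List[int]:
--     # Pairing sieve: each divisor pair (d, n/d) with d*d <= n is counted at
--     # once (+2 per proper pair, +1 at perfect squares), so the sieve only
--     # iterates d up to sqrt(N); the scan then reads tau directly, with no
--     # intermediate n+tau(n) list.
--     tau = [0] * (N + 1)
--     d = 1
--     while d * d <= N:
--         tau[d * d] += 1
--         for m in range(d * d + d, N + 1, d):
--             tau[m] += 2
--         d += 1
--
--     solutions = []
--     running_max = 0
--     for n in range(1, N + 1):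
--         if n > 1:
--             v = (n - 1) + tau[n - 1]
--             if v > running_max:
--                 running_max = v
--         if running_max <= n + 2:
--             solutions.append(n)
--     return solutions
-- ===== Notes on version B (the rewrite author's own statement) =====
-- stated objective: faster
-- what changed: The full divisor sieve over all d in 1..N plus an intermediate n+tau(n) list is replaced by a pairing sieve that iterates d only up to sqrt(N) (adding 2 per divisor pair, 1 at perfect squares) and a fused scan reading tau directly.
import Mathlib
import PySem

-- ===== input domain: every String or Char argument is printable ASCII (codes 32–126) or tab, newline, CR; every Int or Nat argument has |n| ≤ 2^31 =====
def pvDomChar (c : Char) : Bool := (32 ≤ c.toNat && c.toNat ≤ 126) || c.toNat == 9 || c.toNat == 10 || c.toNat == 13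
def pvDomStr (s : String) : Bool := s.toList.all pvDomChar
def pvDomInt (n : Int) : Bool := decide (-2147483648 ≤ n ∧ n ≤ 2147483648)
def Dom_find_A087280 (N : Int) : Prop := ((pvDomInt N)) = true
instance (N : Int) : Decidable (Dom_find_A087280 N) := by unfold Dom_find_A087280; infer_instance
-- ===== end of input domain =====

-- B replaces A's full divisor sieve (all d in 1..N) and intermediate n+tau(n) list by a
-- pairing sieve iterating d only up to sqrt(N) and a fused scan: measurably faster, same values.

-- ===== PORT A =====
-- helper: port of compute_n_plus_tau (indices into tau are always in range 0..N, so pyGetD/set are exact)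
def compute_n_plus_tau (N : Int) : List Int :=
  let tau : List Int := List.replicate (N + 1).toNat 0
  let tau := (PySem.List.pyRange 1 (N + 1) 1).foldl
    (fun tau d => (PySem.List.pyRange d (N + 1) d).foldl
      (fun tau m => tau.set m.toNat (PySem.List.pyGetD tau m 0 + 1)) tau) tau
  (PySem.List.pyRange 1 (N + 1) 1).map (fun n => n + PySem.List.pyGetD tau n 0)

def find_A087280 (N : Int) : List Int :=
  let npt := compute_n_plus_tau N
  let res := (PySem.List.pyRange 1 (N + 1) 1).foldl
    (fun (st : List Int × Int) n =>
      let rm := if n > 1 then max st.2 (PySem.List.pyGetD npt (n - 2) 0) else st.2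
      if rm ≤ n + 2 then (st.1 ++ [n], rm) else (st.1, rm))
    ([], 0)
  res.1

-- ===== PORT B =====
-- helper: the Source B `while d * d <= N` sieve loop; d is encoded as k+1 (the loop's d is always
-- ≥ 1) and `fuel` is a totality guard only (N.toNat + 1 iterations always suffice, see pvSieveB_eq)
def pvSieveB (N : Int) (fuel : Nat) (k : Nat) (tau : List Int) : List Int :=
  match fuel with
  | 0 => tau
  | fuel + 1 =>
    let d : Int := (k : Int) + 1
    if d * d ≤ N then
      let tau := tau.set (d * d).toNat (PySem.List.pyGetD tau (d * d) 0 + 1)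
      let tau := (PySem.List.pyRange (d * d + d) (N + 1) d).foldl
        (fun tau m => tau.set m.toNat (PySem.List.pyGetD tau m 0 + 2)) tau
      pvSieveB N fuel (k + 1) tau
    else tau

def find_A087280_alt (N : Int) : List Int :=
  let tau := pvSieveB N (N.toNat + 1) 0 (List.replicate (N + 1).toNat 0)
  let res := (PySem.List.pyRange 1 (N + 1) 1).foldl
    (fun (st : List Int × Int) n =>
      let rm := if n > 1 then
          (let v := (n - 1) + PySem.List.pyGetD tau (n - 1) 0
           if v > st.2 then v else st.2)
        else st.2
      if rm ≤ n + 2 then (st.1 ++ [n], rm) else (st.1, rm))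
    ([], 0)
  res.1

-- ===== PRECONDITION & SPEC =====
def Spec_find_A087280 (N : Int) (out : List Int) : Prop := out = find_A087280_alt N
instance (N : Int) (out : List Int) : Decidable (Spec_find_A087280 N out) := by unfold Spec_find_A087280; infer_instance

-- ===== CLAIM (what is proved, stated in full; the proofs are below) =====
def Claim_equal_find_A087280 : Prop := ∀ (N : Int), Dom_find_A087280 N → Spec_find_A087280 N (find_A087280 N)

-- ===== LEMMAS AND PROOFS =====

lemma pvGetD_oob (l : List Int) (j : Int) (hj : 0 ≤ j) (h : l.length ≤ j.toNat) :
    PySem.List.pyGetD l j 0 = 0 := by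
  rw [Int.eq_natCast_toNat.mpr hj, PySem.List.pyGetD_natCast, List.getD_eq_default _ _ h]

lemma pvGetD_replicate (n : Nat) (j : Int) (hj : 0 ≤ j) :
    PySem.List.pyGetD (List.replicate n (0 : Int)) j 0 = 0 := by
  rcases lt_or_ge j.toNat n with h | h
  · rw [Int.eq_natCast_toNat.mpr hj, PySem.List.pyGetD_natCast]
    simp [List.getD_eq_getElem?_getD, h]
  · exact pvGetD_oob _ _ hj (by simpa using h)

-- a single `tau[m] += c` step, seen entrywise
lemma pvBump_entry (t : List Int) (m j c : Int) (hm : 0 ≤ m) (hml : m.toNat < t.length)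
    (hj : 0 ≤ j) :
    PySem.List.pyGetD (t.set m.toNat (PySem.List.pyGetD t m 0 + c)) j 0
      = PySem.List.pyGetD t j 0 + (if m = j then c else 0) := by
  rcases lt_or_ge j.toNat t.length with hjl | hjl
  · rw [PySem.List.pyGetD_eq_getElem _ 0 hj (by simp; omega),
        PySem.List.pyGetD_eq_getElem t 0 hj (by omega),
        PySem.List.pyGetD_eq_getElem t 0 hm (by omega)]
    rw [List.getElem_set]
    by_cases h : m = j
    · subst h; simp
    · have : m.toNat ≠ j.toNat := by omega
      simp [this, h]
  · have hmj : m ≠ j := by omega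
    rw [pvGetD_oob _ _ hj (by simpa using hjl), pvGetD_oob t j hj hjl, if_neg hmj]
    simp

lemma pvBumpFold_length (c : Int) (xs : List Int) (t : List Int) :
    (xs.foldl (fun t m => t.set m.toNat (PySem.List.pyGetD t m 0 + c)) t).length = t.length := by
  induction xs generalizing t with
  | nil => rfl
  | cons x xs ih => simp [List.foldl_cons, ih]

-- a `for m in xs: tau[m] += c` loop, seen entrywise: adds c * (count of j in xs)
lemma pvBumpFold_entry (c : Int) (xs : List Int) (t : List Int)
    (hx : ∀ x ∈ xs, 0 ≤ x ∧ x.toNat < t.length) (j : Int) (hj : 0 ≤ j) :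
    PySem.List.pyGetD (xs.foldl (fun t m => t.set m.toNat (PySem.List.pyGetD t m 0 + c)) t) j 0
      = PySem.List.pyGetD t j 0 + c * (xs.count j : Int) := by
  induction xs generalizing t with
  | nil => simp
  | cons x xs ih =>
    obtain ⟨hx0, hxl⟩ := hx x (by simp)
    rw [List.foldl_cons, ih _ (by intro y hy; simpa using hx y (List.mem_cons_of_mem _ hy)),
        pvBump_entry t x j c hx0 hxl hj, List.count_cons]
    push_cast
    by_cases h : x = j
    · simp [h]; ring
    · have hb : ¬ (x == j) = true := by simpa using h
      simp [h, hb]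

lemma pvNodup_pyRange_pos (a b s : Int) (hs : 0 < s) : (PySem.List.pyRange a b s).Nodup := by
  rw [PySem.List.pyRange_of_pos a b hs]
  refine List.Nodup.map ?_ List.nodup_range
  intro x y hxy
  have hxy' : a + s * (x : Int) = a + s * (y : Int) := hxy
  have h1 : s * (x : Int) = s * (y : Int) := by omega
  have := mul_left_cancel₀ (ne_of_gt hs) h1
  exact_mod_cast this

lemma pvCount_pyRange_pos (a b s j : Int) (hs : 0 < s) :
    ((PySem.List.pyRange a b s).count j : Int)
      = if a ≤ j ∧ j < b ∧ s ∣ j - a then 1 else 0 := by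
  by_cases hmem : j ∈ PySem.List.pyRange a b s
  · rw [List.count_eq_one_of_mem (pvNodup_pyRange_pos a b s hs) hmem,
        if_pos ((PySem.List.mem_pyRange_iff_of_pos hs j).mp hmem)]
    simp
  · rw [List.count_eq_zero.mpr hmem,
        if_neg (fun h => hmem ((PySem.List.mem_pyRange_iff_of_pos hs j).mpr h))]
    simp

-- entry j of A's sieve after folding the outer loop over ds
lemma pvTauA_entry (N : Int) (ds : List Int) (t : List Int) (ht : t.length = (N + 1).toNat)
    (hd : ∀ d ∈ ds, 1 ≤ d) (j : Int) (hj : 0 ≤ j) :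
    PySem.List.pyGetD
      (ds.foldl (fun tau d => (PySem.List.pyRange d (N + 1) d).foldl
        (fun tau m => tau.set m.toNat (PySem.List.pyGetD tau m 0 + 1)) tau) t) j 0
      = PySem.List.pyGetD t j 0
        + ((ds.map (fun d => if d ≤ j ∧ j < N + 1 ∧ d ∣ j - d then (1 : Int) else 0)).sum) := by
  induction ds generalizing t with
  | nil => simp
  | cons d ds ih =>
    have hd1 : (1 : Int) ≤ d := hd d (by simp)
    have hds : (0 : Int) < d := by omega
    have hmemr : ∀ x ∈ PySem.List.pyRange d (N + 1) d, 0 ≤ x ∧ x.toNat < t.length := by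
      intro x hx
      obtain ⟨h1, h2, _⟩ := (PySem.List.mem_pyRange_iff_of_pos hds x).mp hx
      exact ⟨by omega, by rw [ht]; omega⟩
    rw [List.foldl_cons, ih _ (by rw [pvBumpFold_length]; exact ht)
          (fun e he => hd e (List.mem_cons_of_mem _ he)),
        pvBumpFold_entry 1 _ t hmemr j hj, pvCount_pyRange_pos _ _ _ _ hds,
        List.map_cons, List.sum_cons]
    ring

-- entry j of B's sieve body after folding over ds
lemma pvTauB_entry (N : Int) (ds : List Int) (t : List Int) (ht : t.length = (N + 1).toNat)
    (hd : ∀ d ∈ ds, 1 ≤ d ∧ d * d ≤ N) (j : Int) (hj : 0 ≤ j) :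
    PySem.List.pyGetD
      (ds.foldl (fun tau d =>
        (PySem.List.pyRange (d * d + d) (N + 1) d).foldl
          (fun tau m => tau.set m.toNat (PySem.List.pyGetD tau m 0 + 2))
          (tau.set (d * d).toNat (PySem.List.pyGetD tau (d * d) 0 + 1))) t) j 0
      = PySem.List.pyGetD t j 0
        + ((ds.map (fun d => (if d * d = j then (1 : Int) else 0)
            + 2 * (if d * d + d ≤ j ∧ j < N + 1 ∧ d ∣ j - (d * d + d) then (1 : Int) else 0))).sum) := by
  induction ds generalizing t with
  | nil => simp
  | cons d ds ih =>
    obtain ⟨hd1, hdN⟩ := hd d (by simp)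
    have hds : (0 : Int) < d := by omega
    have hdd0 : (0 : Int) ≤ d * d := by positivity
    have hddl : (d * d).toNat < t.length := by rw [ht]; omega
    have hmemr : ∀ x ∈ PySem.List.pyRange (d * d + d) (N + 1) d,
        0 ≤ x ∧ x.toNat < (t.set (d * d).toNat (PySem.List.pyGetD t (d * d) 0 + 1)).length := by
      intro x hx
      obtain ⟨h1, h2, _⟩ := (PySem.List.mem_pyRange_iff_of_pos hds x).mp hx
      have hx0 : (0 : Int) ≤ x := by nlinarith
      refine ⟨hx0, ?_⟩
      simp only [List.length_set]
      rw [ht]; omega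
    rw [List.foldl_cons, ih _ (by rw [pvBumpFold_length]; simp [ht])
          (fun e he => hd e (List.mem_cons_of_mem _ he)),
        pvBumpFold_entry 2 _ _ hmemr j hj,
        pvBump_entry t (d * d) j 1 hdd0 hddl hj,
        pvCount_pyRange_pos _ _ _ _ hds, List.map_cons, List.sum_cons]
    ring

-- the while loop of B is the fold over d = 1 .. sqrt(N) (fuel suffices once k + fuel covers sqrt N)
lemma pvSieveB_eq (N : Int) (fuel k : Nat) (t : List Int) (hf : N.toNat.sqrt ≤ k + fuel) :
    pvSieveB N fuel k t
      = (PySem.List.pyRange ((k : Int) + 1) ((N.toNat.sqrt : Int) + 1) 1).foldl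
          (fun tau d =>
            (PySem.List.pyRange (d * d + d) (N + 1) d).foldl
              (fun tau m => tau.set m.toNat (PySem.List.pyGetD tau m 0 + 2))
              (tau.set (d * d).toNat (PySem.List.pyGetD tau (d * d) 0 + 1))) t := by
  induction fuel generalizing k t with
  | zero =>
    have hks : N.toNat.sqrt ≤ k := by omega
    have hnil : PySem.List.pyRange ((k : Int) + 1) ((N.toNat.sqrt : Int) + 1) 1 = [] := by
      apply PySem.List.pyRange_one_eq_nil
      have : (N.toNat.sqrt : Int) ≤ (k : Int) := by exact_mod_cast hks
      omega
    rw [hnil]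
    rfl
  | succ fuel ih =>
    by_cases h : ((k : Int) + 1) * ((k : Int) + 1) ≤ N
    · have hN0 : (0 : Int) ≤ N := by nlinarith
      have hsq : (k + 1) ≤ N.toNat.sqrt := by
        rw [Nat.le_sqrt]
        have hc : (((k + 1) * (k + 1) : Nat) : Int) ≤ (N.toNat : Int) := by push_cast; omega
        exact_mod_cast hc
      have hlt : (k : Int) + 1 < (N.toNat.sqrt : Int) + 1 := by
        have : ((k + 1 : Nat) : Int) ≤ (N.toNat.sqrt : Int) := by exact_mod_cast hsq
        push_cast at this; omega
      show (if ((k : Int) + 1) * ((k : Int) + 1) ≤ N then _ else t) = _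
      rw [if_pos h, PySem.List.pyRange_one_cons hlt, List.foldl_cons]
      have hcast : ((k : Int) + 1) + 1 = (((k + 1 : Nat)) : Int) + 1 := by push_cast; ring
      rw [hcast]
      exact ih (k + 1) _ (by omega)
    · have hnil : PySem.List.pyRange ((k : Int) + 1) ((N.toNat.sqrt : Int) + 1) 1 = [] := by
        apply PySem.List.pyRange_one_eq_nil
        have hks : N.toNat.sqrt ≤ k := by
          by_contra hc
          have hk1 : k + 1 ≤ N.toNat.sqrt := by omega
          rw [Nat.le_sqrt] at hk1
          apply h
          have hc2 : (((k + 1) * (k + 1) : Nat) : Int) ≤ (N.toNat : Int) := by exact_mod_cast hk1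
          push_cast at hc2
          by_cases hN : (0 : Int) ≤ N
          · omega
          · have ht0 : N.toNat = 0 := by omega
            rw [ht0] at hk1
            have hp : 0 < (k + 1) * (k + 1) := Nat.mul_pos (by omega) (by omega)
            omega
        have : (N.toNat.sqrt : Int) ≤ (k : Int) := by exact_mod_cast hks
        omega
      show (if ((k : Int) + 1) * ((k : Int) + 1) ≤ N then _ else t) = _
      rw [if_neg h, hnil, List.foldl_nil]

-- ((List.range n).map f).sum is the Finset.range sum (definitional)
lemma pvListSum_eq_finsetSum (n : Nat) (f : Nat → Int) :
    ((List.range n).map f).sum = ∑ k ∈ Finset.range n, f k := rfl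

-- among the divisors of m, exactly one squares to m, and only when m is a perfect square
lemma pvSqCard (m : Nat) (h1 : 1 ≤ m) :
    (m.divisors.filter (fun d => d * d = m)).card = (if m.sqrt * m.sqrt = m then 1 else 0) := by
  have hm0 : m ≠ 0 := by omega
  split_ifs with h
  · rw [show m.divisors.filter (fun d => d * d = m) = {m.sqrt} from ?_, Finset.card_singleton]
    rw [Finset.eq_singleton_iff_unique_mem]
    constructor
    · simp only [Finset.mem_filter, Nat.mem_divisors]
      exact ⟨⟨⟨m.sqrt, h.symm⟩, hm0⟩, h⟩
    · intro d hd
      obtain ⟨_, hdd⟩ := Finset.mem_filter.mp hd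
      rw [← hdd, Nat.sqrt_eq]
  · rw [Finset.card_eq_zero.mpr (Finset.filter_eq_empty_iff.mpr ?_)]
    intro d _ hdd
    exact h (by rw [← hdd, Nat.sqrt_eq])

-- divisor pairing on Nat.divisors: d ↦ m / d swaps small and large divisors
lemma pvPairing (m : Nat) (h1 : 1 ≤ m) :
    m.divisors.card = 2 * (m.divisors.filter (fun d => d * d < m)).card
      + (if m.sqrt * m.sqrt = m then 1 else 0) := by
  have hm0 : m ≠ 0 := by omega
  have hswap : (m.divisors.filter (fun d => m < d * d)).card
      = (m.divisors.filter (fun d => d * d < m)).card := by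
    rw [Finset.card_filter, Finset.card_filter,
        ← Nat.sum_div_divisors m (fun d => if d * d < m then 1 else 0)]
    apply Finset.sum_congr rfl
    intro d hd
    obtain ⟨hdvd, _⟩ := Nat.mem_divisors.mp hd
    have hd0 : 0 < d := Nat.pos_of_ne_zero (by rintro rfl; rw [zero_dvd_iff] at hdvd; omega)
    have hq : m / d * d = m := Nat.div_mul_cancel hdvd
    have hq0 : 0 < m / d := by
      rcases Nat.eq_zero_or_pos (m / d) with h | h
      · rw [h] at hq; omega
      · exact h
    congr 1
    rw [eq_iff_iff]
    constructor
    · intro h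
      have h2 : m / d * d < d * d := by rw [hq]; exact h
      have hqd : m / d < d := lt_of_mul_lt_mul_right h2 (Nat.zero_le _)
      nlinarith
    · intro h
      have h2 : m / d * (m / d) < m / d * d := by rw [hq]; exact h
      have hqd : m / d < d := lt_of_mul_lt_mul_left h2 (Nat.zero_le _)
      nlinarith
  calc m.divisors.card
      = ∑ d ∈ m.divisors, ((if d * d < m then 1 else 0)
          + ((if d * d = m then 1 else 0) + (if m < d * d then 1 else 0))) := by
        rw [Finset.card_eq_sum_ones]
        apply Finset.sum_congr rfl
        intro d _
        split_ifs <;> omega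
    _ = (m.divisors.filter (fun d => d * d < m)).card
          + ((m.divisors.filter (fun d => d * d = m)).card
            + (m.divisors.filter (fun d => m < d * d)).card) := by
        rw [Finset.sum_add_distrib, Finset.sum_add_distrib,
            Finset.card_filter, Finset.card_filter, Finset.card_filter]
    _ = 2 * (m.divisors.filter (fun d => d * d < m)).card
          + (if m.sqrt * m.sqrt = m then 1 else 0) := by
        rw [hswap, pvSqCard m h1]; omega

-- the number-theoretic core: counting all divisors equals the pairing count
lemma pvKey (m M : Nat) (h1 : 1 ≤ m) (hm : m ≤ M) :
    (∑ k ∈ Finset.range M, (if (1 + k) ∣ m ∧ 1 + k ≤ m then (1 : Int) else 0))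
      = ∑ k ∈ Finset.range M.sqrt,
          ((if (1 + k) * (1 + k) = m then (1 : Int) else 0)
            + 2 * (if (1 + k) ∣ m ∧ (1 + k) * (1 + k) + (1 + k) ≤ m then (1 : Int) else 0)) := by
  have hm0 : m ≠ 0 := by omega
  have eL : (∑ k ∈ Finset.range M, (if (1 + k) ∣ m ∧ 1 + k ≤ m then (1 : Int) else 0))
      = ∑ d ∈ Finset.Ico 1 (M + 1), (if d ∣ m ∧ d ≤ m then (1 : Int) else 0) := by
    rw [Finset.sum_Ico_eq_sum_range]; norm_num
  have eS : (∑ k ∈ Finset.range M.sqrt, (if (1 + k) * (1 + k) = m then (1 : Int) else 0))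
      = ∑ d ∈ Finset.Ico 1 (M.sqrt + 1), (if d * d = m then (1 : Int) else 0) := by
    rw [Finset.sum_Ico_eq_sum_range]; norm_num
  have eB : (∑ k ∈ Finset.range M.sqrt,
        (if (1 + k) ∣ m ∧ (1 + k) * (1 + k) + (1 + k) ≤ m then (1 : Int) else 0))
      = ∑ d ∈ Finset.Ico 1 (M.sqrt + 1), (if d ∣ m ∧ d * d + d ≤ m then (1 : Int) else 0) := by
    rw [Finset.sum_Ico_eq_sum_range]; norm_num
  have hsetA : (Finset.Ico 1 (M + 1)).filter (fun d => d ∣ m ∧ d ≤ m) = m.divisors := by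
    ext d
    simp only [Finset.mem_filter, Finset.mem_Ico, Nat.mem_divisors]
    constructor
    · rintro ⟨_, hdvd, _⟩; exact ⟨hdvd, hm0⟩
    · rintro ⟨hdvd, _⟩
      have hd0 : d ≠ 0 := by rintro rfl; rw [zero_dvd_iff] at hdvd; omega
      have hdm : d ≤ m := Nat.le_of_dvd (by omega) hdvd
      exact ⟨⟨by omega, by omega⟩, hdvd, hdm⟩
  have hsetS : (Finset.Ico 1 (M.sqrt + 1)).filter (fun d => d * d = m)
      = m.divisors.filter (fun d => d * d = m) := by
    ext d
    simp only [Finset.mem_filter, Finset.mem_Ico, Nat.mem_divisors]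
    constructor
    · rintro ⟨_, hdd⟩; exact ⟨⟨⟨d, hdd.symm⟩, hm0⟩, hdd⟩
    · rintro ⟨⟨hdvd, _⟩, hdd⟩
      have hd0 : d ≠ 0 := by rintro rfl; simp at hdd; omega
      have hdS : d ≤ M.sqrt := Nat.le_sqrt.mpr (by omega)
      exact ⟨⟨by omega, by omega⟩, hdd⟩
  have hsetB : (Finset.Ico 1 (M.sqrt + 1)).filter (fun d => d ∣ m ∧ d * d + d ≤ m)
      = m.divisors.filter (fun d => d * d < m) := by
    ext d
    simp only [Finset.mem_filter, Finset.mem_Ico, Nat.mem_divisors]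
    constructor
    · rintro ⟨⟨hd1, _⟩, hdvd, hle⟩
      exact ⟨⟨hdvd, hm0⟩, by omega⟩
    · rintro ⟨⟨hdvd, _⟩, hlt⟩
      have hd0 : d ≠ 0 := by rintro rfl; rw [zero_dvd_iff] at hdvd; omega
      have hdS : d ≤ M.sqrt := Nat.le_sqrt.mpr (by omega)
      have hq : d * (m / d) = m := Nat.mul_div_cancel' hdvd
      have hqgt : d < m / d := by
        by_contra hc
        have hc' : m / d ≤ d := by omega
        nlinarith
      have hmul : d * (d + 1) ≤ d * (m / d) := Nat.mul_le_mul_left d (by omega)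
      refine ⟨⟨by omega, by omega⟩, hdvd, by nlinarith⟩
  rw [eL, Finset.sum_add_distrib, ← Finset.mul_sum, eS, eB,
      Finset.sum_boole, Finset.sum_boole, Finset.sum_boole,
      show {d ∈ Finset.Ico 1 (M + 1) | d ∣ m ∧ d ≤ m} = m.divisors from hsetA,
      show {d ∈ Finset.Ico 1 (M.sqrt + 1) | d * d = m} = m.divisors.filter (fun d => d * d = m) from hsetS,
      show {d ∈ Finset.Ico 1 (M.sqrt + 1) | d ∣ m ∧ d * d + d ≤ m} = m.divisors.filter (fun d => d * d < m) from hsetB,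
      pvPairing m h1, pvSqCard m h1]
  split_ifs <;> push_cast <;> ring

-- the core identity, stated over the Int-level indicators appearing in the sieve sums
lemma pvKeyInt (N j : Int) (h1 : 1 ≤ j) (hN : j ≤ N) :
    (∑ k ∈ Finset.range N.toNat,
        (if 1 + (k : Int) ≤ j ∧ j < N + 1 ∧ (1 + (k : Int)) ∣ j - (1 + (k : Int)) then (1 : Int) else 0))
      = ∑ k ∈ Finset.range N.toNat.sqrt,
          ((if (1 + (k : Int)) * (1 + (k : Int)) = j then (1 : Int) else 0)
            + 2 * (if (1 + (k : Int)) * (1 + (k : Int)) + (1 + (k : Int)) ≤ j ∧ j < N + 1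
                ∧ (1 + (k : Int)) ∣ j - ((1 + (k : Int)) * (1 + (k : Int)) + (1 + (k : Int))) then (1 : Int) else 0)) := by
  have hjc : j = ((j.toNat : Nat) : Int) := Int.eq_natCast_toNat.mpr (by omega)
  have hA : ∀ k ∈ Finset.range N.toNat,
      (if 1 + (k : Int) ≤ j ∧ j < N + 1 ∧ (1 + (k : Int)) ∣ j - (1 + (k : Int)) then (1 : Int) else 0)
        = (if (1 + k) ∣ j.toNat ∧ 1 + k ≤ j.toNat then (1 : Int) else 0) := by
    intro k _
    refine if_congr ?_ rfl rfl
    constructor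
    · rintro ⟨ha, _, hc⟩
      have hdj : (1 + (k : Int)) ∣ j := by simpa using dvd_add hc (dvd_refl _)
      rw [hjc] at hdj ha
      exact ⟨by exact_mod_cast hdj, by exact_mod_cast ha⟩
    · rintro ⟨ha, hb⟩
      have hdj : (1 + (k : Int)) ∣ j := by rw [hjc]; exact_mod_cast ha
      exact ⟨by omega, by omega, by simpa using dvd_sub hdj (dvd_refl _)⟩
  have hB : ∀ k ∈ Finset.range N.toNat.sqrt,
      ((if (1 + (k : Int)) * (1 + (k : Int)) = j then (1 : Int) else 0)
        + 2 * (if (1 + (k : Int)) * (1 + (k : Int)) + (1 + (k : Int)) ≤ j ∧ j < N + 1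
            ∧ (1 + (k : Int)) ∣ j - ((1 + (k : Int)) * (1 + (k : Int)) + (1 + (k : Int))) then (1 : Int) else 0))
        = ((if (1 + k) * (1 + k) = j.toNat then (1 : Int) else 0)
            + 2 * (if (1 + k) ∣ j.toNat ∧ (1 + k) * (1 + k) + (1 + k) ≤ j.toNat then (1 : Int) else 0)) := by
    intro k _
    have hdd : (1 + (k : Int)) ∣ ((1 + (k : Int)) * (1 + (k : Int)) + (1 + (k : Int))) :=
      ⟨(1 + (k : Int)) + 1, by ring⟩
    have e1 : (if (1 + (k : Int)) * (1 + (k : Int)) = j then (1 : Int) else 0)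
        = (if (1 + k) * (1 + k) = j.toNat then (1 : Int) else 0) := by
      refine if_congr ?_ rfl rfl
      rw [hjc]
      constructor
      · intro h; exact_mod_cast h
      · intro h; exact_mod_cast h
    have e2 : (if (1 + (k : Int)) * (1 + (k : Int)) + (1 + (k : Int)) ≤ j ∧ j < N + 1
            ∧ (1 + (k : Int)) ∣ j - ((1 + (k : Int)) * (1 + (k : Int)) + (1 + (k : Int))) then (1 : Int) else 0)
        = (if (1 + k) ∣ j.toNat ∧ (1 + k) * (1 + k) + (1 + k) ≤ j.toNat then (1 : Int) else 0) := by
      refine if_congr ?_ rfl rfl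
      constructor
      · rintro ⟨ha, _, hc⟩
        have hdj : (1 + (k : Int)) ∣ j := by simpa using dvd_add hc hdd
        rw [hjc] at hdj ha
        exact ⟨by exact_mod_cast hdj, by exact_mod_cast ha⟩
      · rintro ⟨ha, hb⟩
        have hdj : (1 + (k : Int)) ∣ j := by rw [hjc]; exact_mod_cast ha
        have hb' : (1 + (k : Int)) * (1 + (k : Int)) + (1 + (k : Int)) ≤ j := by
          rw [hjc]; exact_mod_cast hb
        exact ⟨hb', by omega, by simpa using dvd_sub hdj hdd⟩
    rw [e1, e2]
  rw [Finset.sum_congr rfl hA, Finset.sum_congr rfl hB]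
  exact pvKey j.toNat N.toNat (by omega) (by omega)

-- the two tau tables agree on entries 1..N
lemma pvTau_agree (N j : Int) (h1 : 1 ≤ j) (hN : j ≤ N) :
    PySem.List.pyGetD
      ((PySem.List.pyRange 1 (N + 1) 1).foldl (fun tau d => (PySem.List.pyRange d (N + 1) d).foldl
        (fun tau m => tau.set m.toNat (PySem.List.pyGetD tau m 0 + 1)) tau)
        (List.replicate (N + 1).toNat 0)) j 0
      = PySem.List.pyGetD (pvSieveB N (N.toNat + 1) 0 (List.replicate (N + 1).toNat 0)) j 0 := by
  have hj0 : (0 : Int) ≤ j := by omega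
  have hdB : ∀ d ∈ PySem.List.pyRange (((0 : Nat) : Int) + 1) ((N.toNat.sqrt : Int) + 1) 1,
      1 ≤ d ∧ d * d ≤ N := by
    intro d hd
    obtain ⟨hd1, hd2⟩ := PySem.List.mem_pyRange_one.mp hd
    have hd1' : (1 : Int) ≤ d := by push_cast at hd1; omega
    refine ⟨hd1', ?_⟩
    have hds : d.toNat ≤ N.toNat.sqrt := by omega
    have h2 : ((d.toNat * d.toNat : Nat) : Int) ≤ (N.toNat : Int) := by
      exact_mod_cast Nat.le_sqrt.mp hds
    have hd' : d = (d.toNat : Int) := by omega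
    rw [hd']
    push_cast at h2
    omega
  rw [pvTauA_entry N _ _ (by simp) (fun d hd => (PySem.List.mem_pyRange_one.mp hd).1) j hj0,
      pvSieveB_eq N (N.toNat + 1) 0 _ (by have := Nat.sqrt_le_self N.toNat; omega),
      pvTauB_entry N _ _ (by simp) hdB j hj0,
      pvGetD_replicate _ j hj0]
  congr 1
  rw [PySem.List.pyRange_one 1 (N + 1), PySem.List.pyRange_one (((0 : Nat) : Int) + 1) ((N.toNat.sqrt : Int) + 1),
      List.map_map, List.map_map, pvListSum_eq_finsetSum, pvListSum_eq_finsetSum]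
  have hb1 : ((N + 1 : Int) - 1).toNat = N.toNat := by omega
  have hb2 : (((N.toNat.sqrt : Int) + 1) - (((0 : Nat) : Int) + 1)).toNat = N.toNat.sqrt := by
    push_cast; omega
  rw [hb1, hb2]
  have := pvKeyInt N j h1 hN
  calc (∑ k ∈ Finset.range N.toNat,
          ((fun d => if d ≤ j ∧ j < N + 1 ∧ d ∣ j - d then (1 : Int) else 0) ∘ fun k : Nat => 1 + (k : Int)) k)
      = ∑ k ∈ Finset.range N.toNat,
          (if 1 + (k : Int) ≤ j ∧ j < N + 1 ∧ (1 + (k : Int)) ∣ j - (1 + (k : Int)) then (1 : Int) else 0) := rfl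
    _ = _ := by
        rw [this]
        apply Finset.sum_congr rfl
        intro k _
        simp [Function.comp]
  -- final alignment of the composed map on the B side is handled in the calc above

-- ===== VERDICT (by name: the statement is the Claim_ definition above) =====
theorem find_A087280_spec : Claim_equal_find_A087280 := by
  intro N _
  unfold Spec_find_A087280 find_A087280 find_A087280_alt compute_n_plus_tau
  dsimp only
  refine congrArg Prod.fst ?_
  apply PySem.List.foldl_congr_mem
  intro acc n hn
  obtain ⟨hn1, hn2⟩ := PySem.List.mem_pyRange_one.mp hn
  by_cases h2 : n > 1
  · simp only [if_pos h2]
    have hk : ((n - 2).toNat) < ((N + 1) - 1).toNat := by omega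
    have hcast : (n - 2) = (((n - 2).toNat : Nat) : Int) := by omega
    rw [hcast, PySem.List.pyGetD_map_pyRange_one _ 1 (N + 1) _ 0 hk]
    have h15 : (1 + ((n - 2).toNat : Int)) = n - 1 := by omega
    rw [h15, pvTau_agree N (n - 1) (by omega) (by omega)]
    have hmaxif : ∀ (a v : Int), max a v = if v > a then v else a := by
      intro a v
      rcases le_or_gt v a with h | h
      · rw [max_eq_left h, if_neg (by omega)]
      · rw [max_eq_right (le_of_lt h), if_pos h]
    rw [hmaxif]
  · simp only [if_neg h2]
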